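-- pv_equiv track=rewrite | github.com/WallerTsai/OJ-Solution | leetcode-py/贪心/策略贪心/极差最小化/No3854.py | makeParityAlternating
-- ===== SOURCE A (Python) =====
-- from typing import List
--
-- def makeParityAlternating(nums: List[int]) -> List[int]:
--     n = len(nums)
--     if n < 2:
--         return [0, 0]
--     MAX, MIN = max(nums), min(nums)
--     def func(flag: int):
--         array = nums.copy()
--         res = 0
--         for i, x in enumerate(array):
--             if (x % 2 == i % 2) == flag:
--                 continue
--             if x == MAX:
--                 array[i] -= 1
--             elif x == MIN:
--                 array[i] += 1
--             res += 1
--         return [res, max(array) - min(array)]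
--
--     return min(func(0), func(1))
-- ===== SOURCE B (Python) =====
-- from typing import List
--
-- def makeParityAlternating(nums: List[int]) -> List[int]:
--     n = len(nums)
--     if n < 2:
--         return [0, 0]
--     MAX, MIN = max(nums), min(nums)
--     # one fused pass: count flag-0 edits and keep running extremes of both
--     # edited sequences; no array copies, flag-1 count is the complement.
--     res0 = 0
--     mx0 = mx1 = MIN - 1   # every produced value is >= MIN - 1
--     mn0 = mn1 = MAX       # every produced value is <= MAX
--     for i, x in enumerate(nums):
--         e = x - 1 if x == MAX else (x + 1 if x == MIN else x)  # value if edited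
--         if x % 2 == i % 2:
--             res0 += 1
--             v0, v1 = e, x
--         else:
--             v0, v1 = x, e
--         if v0 > mx0: mx0 = v0
--         if v0 < mn0: mn0 = v0
--         if v1 > mx1: mx1 = v1
--         if v1 < mn1: mn1 = v1
--     r0 = [res0, mx0 - mn0]
--     r1 = [n - res0, mx1 - mn1]
--     return r1 if r1 < r0 else r0
-- ===== Notes on version B (the rewrite author's own statement) =====
-- stated objective: alternative
-- what changed: B replaces A's two mutated array copies and repeated built-in max/min scans by one fused pass that counts flag-0 edits (flag-1 count is the complement) and maintains running extremes of both edited sequences in scalar accumulators, never materializing the edited arrays.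
import Mathlib
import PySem

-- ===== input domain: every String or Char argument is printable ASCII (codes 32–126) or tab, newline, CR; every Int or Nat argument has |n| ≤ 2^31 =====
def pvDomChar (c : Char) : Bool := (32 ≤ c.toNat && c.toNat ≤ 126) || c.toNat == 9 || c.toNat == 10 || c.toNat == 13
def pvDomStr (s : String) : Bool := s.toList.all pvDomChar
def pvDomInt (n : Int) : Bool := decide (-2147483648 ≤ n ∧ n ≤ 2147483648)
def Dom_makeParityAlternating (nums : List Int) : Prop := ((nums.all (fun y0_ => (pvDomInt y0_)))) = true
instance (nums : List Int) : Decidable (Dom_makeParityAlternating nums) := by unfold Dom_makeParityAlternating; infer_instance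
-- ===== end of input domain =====

-- B fuses A's two mutated array copies and six extra max/min list scans into one
-- streaming pass with scalar accumulators (same O(n) cost, O(1) extra space).


-- Python's lexicographic '<' on lists of ints (shared primitive for both ports)
def pyListLt : List Int → List Int → Bool
  | [], [] => false
  | [], _ :: _ => true
  | _ :: _, [] => false
  | a :: as, b :: bs => if a < b then true else if b < a then false else pyListLt as bs

-- ===== PORT A =====
-- loop body of A's inner `func`: state = (array, res); `array[i] -= 1` / `+= 1`
-- is `List.set` at the enumerate index (p.1 ≥ 0, so .toNat is exact); Python's
-- `(x % 2 == i % 2) == flag` compares the bool (as 0/1) with the int flag.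
def pvStepA (MAX MIN flag : Int) (s : List Int × Int) (p : Int × Int) : List Int × Int :=
  if (if PySem.Int.mod p.2 2 == PySem.Int.mod p.1 2 then (1 : Int) else 0) == flag then s
  else
    ((if p.2 == MAX then s.1.set p.1.toNat (p.2 - 1)
      else if p.2 == MIN then s.1.set p.1.toNat (p.2 + 1)
      else s.1), s.2 + 1)

-- A's `func(flag)`: iterate over enumerate(array); the mutation at index i happens
-- after x = array[i] is read, so iterating over the original `nums` is exact.
def pvFuncA (nums : List Int) (MAX MIN flag : Int) : List Int :=
  let st := (PySem.List.enumerate nums 0).foldl (pvStepA MAX MIN flag) (nums, 0)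
  [st.2, (PySem.List.max? st.1 (fun y => y)).getD 0 - (PySem.List.min? st.1 (fun y => y)).getD 0]

def makeParityAlternating (nums : List Int) : List Int :=
  let n := nums.length
  if n < 2 then [0, 0]
  else
    -- n ≥ 2 so nums ≠ [] and max?/min? are some; .getD 0 is never the default
    let MAX := (PySem.List.max? nums (fun y => y)).getD 0
    let MIN := (PySem.List.min? nums (fun y => y)).getD 0
    let r0 := pvFuncA nums MAX MIN 0
    let r1 := pvFuncA nums MAX MIN 1
    if pyListLt r1 r0 then r1 else r0   -- min(func(0), func(1))

-- ===== PORT B =====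
-- loop body of B: state = (res0, mx0, mn0, mx1, mn1)
def pvStepB (MAX MIN : Int) (s : Int × Int × Int × Int × Int) (p : Int × Int) :
    Int × Int × Int × Int × Int :=
  let e := if p.2 == MAX then p.2 - 1 else if p.2 == MIN then p.2 + 1 else p.2
  let t := if PySem.Int.mod p.2 2 == PySem.Int.mod p.1 2 then (s.1 + 1, e, p.2) else (s.1, p.2, e)
  (t.1,
   (if t.2.1 > s.2.1 then t.2.1 else s.2.1),
   (if t.2.1 < s.2.2.1 then t.2.1 else s.2.2.1),
   (if t.2.2 > s.2.2.2.1 then t.2.2 else s.2.2.2.1),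
   (if t.2.2 < s.2.2.2.2 then t.2.2 else s.2.2.2.2))

def makeParityAlternating_alt (nums : List Int) : List Int :=
  let n := nums.length
  if n < 2 then [0, 0]
  else
    let MAX := (PySem.List.max? nums (fun y => y)).getD 0
    let MIN := (PySem.List.min? nums (fun y => y)).getD 0
    let st := (PySem.List.enumerate nums 0).foldl (pvStepB MAX MIN) (0, MIN - 1, MAX, MIN - 1, MAX)
    let r0 := [st.1, st.2.1 - st.2.2.1]
    let r1 := [(n : Int) - st.1, st.2.2.2.1 - st.2.2.2.2]
    if pyListLt r1 r0 then r1 else r0   -- r1 if r1 < r0 else r0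

-- ===== PRECONDITION & SPEC =====
def Spec_makeParityAlternating (nums : List Int) (out : List Int) : Prop := out = makeParityAlternating_alt nums
instance (nums : List Int) (out : List Int) : Decidable (Spec_makeParityAlternating nums out) := by unfold Spec_makeParityAlternating; infer_instance

-- ===== CLAIM (what is proved, stated in full; the proofs are below) =====
def Claim_equal_makeParityAlternating : Prop := ∀ (nums : List Int), Dom_makeParityAlternating nums → Spec_makeParityAlternating nums (makeParityAlternating nums)

-- ===== LEMMAS AND PROOFS =====

-- proof-side abbreviations
def pvEdit (MAX MIN : Int) (p : Int × Int) : Int :=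
  if p.2 == MAX then p.2 - 1 else if p.2 == MIN then p.2 + 1 else p.2

def pvMatch (p : Int × Int) : Bool := PySem.Int.mod p.2 2 == PySem.Int.mod p.1 2

def pvV0 (MAX MIN : Int) (p : Int × Int) : Int := if pvMatch p then pvEdit MAX MIN p else p.2
def pvV1 (MAX MIN : Int) (p : Int × Int) : Int := if pvMatch p then p.2 else pvEdit MAX MIN p

theorem pvIfMax (a b : Int) : (if b > a then b else a) = max a b := by
  rw [max_def]; split <;> split <;> omega

theorem pvIfMin (a b : Int) : (if b < a then b else a) = min a b := by
  rw [min_def]; split <;> split <;> omega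

-- A's loop, characterized: the mutated array is the pointwise-edited list
theorem pvA_loop (MAX MIN flag : Int) (hf : flag = 0 ∨ flag = 1) :
    ∀ (cur pre : List Int) (r : Int),
      (PySem.List.enumerate cur (pre.length : Int)).foldl (pvStepA MAX MIN flag) (pre ++ cur, r)
      = (pre ++ (PySem.List.enumerate cur (pre.length : Int)).map
            (fun p => if flag = 0 then pvV0 MAX MIN p else pvV1 MAX MIN p),
         r + ((PySem.List.enumerate cur (pre.length : Int)).countP
            (fun p => if flag = 0 then pvMatch p else !pvMatch p) : Int)) := by
  intro cur
  induction cur with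
  | nil => intro pre r; simp [PySem.List.enumerate_nil]
  | cons x t ih =>
    intro pre r
    rw [PySem.List.enumerate_cons]
    simp only [List.foldl_cons, List.map_cons, List.countP_cons]
    have hset : ∀ v : Int, (pre ++ x :: t).set ((pre.length : Int)).toNat v = pre ++ v :: t := by
      intro v; simp
    have key : pvStepA MAX MIN flag (pre ++ x :: t, r) ((pre.length : Int), x)
        = (pre ++ (if flag = 0 then pvV0 MAX MIN ((pre.length : Int), x)
                   else pvV1 MAX MIN ((pre.length : Int), x)) :: t,
           r + (if (if flag = 0 then pvMatch ((pre.length : Int), x)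
                    else !pvMatch ((pre.length : Int), x)) then 1 else 0)) := by
      rcases hf with hf | hf <;> subst hf <;>
        simp only [pvStepA, pvV0, pvV1, pvMatch, pvEdit] <;>
        by_cases hm : (PySem.Int.mod x 2 == PySem.Int.mod (pre.length : Int) 2) = true <;>
        by_cases h1 : (x == MAX) = true <;>
        by_cases h2 : (x == MIN) = true <;>
        simp [hm, h1, h2, hset] <;> (try (split <;> simp))
    rw [key]
    have hpre : pre ++ ((if flag = 0 then pvV0 MAX MIN ((pre.length : Int), x)
        else pvV1 MAX MIN ((pre.length : Int), x)) :: t)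
        = (pre ++ [if flag = 0 then pvV0 MAX MIN ((pre.length : Int), x)
            else pvV1 MAX MIN ((pre.length : Int), x)]) ++ t := by simp
    have hlen : ((pre.length : Int) + 1)
        = ((pre ++ [if flag = 0 then pvV0 MAX MIN ((pre.length : Int), x)
            else pvV1 MAX MIN ((pre.length : Int), x)]).length : Int) := by
      simp
    rw [hpre, hlen, ih]
    rw [Prod.ext_iff]
    refine ⟨by simp, ?_⟩
    simp only
    push_cast
    split <;> ring

-- B's loop, characterized: count of matches plus four running extremes
theorem pvB_loop (MAX MIN : Int) :
    ∀ (cur : List Int) (s : Int) (r mx0 mn0 mx1 mn1 : Int),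
      (PySem.List.enumerate cur s).foldl (pvStepB MAX MIN) (r, mx0, mn0, mx1, mn1)
      = (r + ((PySem.List.enumerate cur s).countP pvMatch : Int),
         ((PySem.List.enumerate cur s).map (pvV0 MAX MIN)).foldl max mx0,
         ((PySem.List.enumerate cur s).map (pvV0 MAX MIN)).foldl min mn0,
         ((PySem.List.enumerate cur s).map (pvV1 MAX MIN)).foldl max mx1,
         ((PySem.List.enumerate cur s).map (pvV1 MAX MIN)).foldl min mn1) := by
  intro cur
  induction cur with
  | nil => intro s r mx0 mn0 mx1 mn1; simp [PySem.List.enumerate_nil]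
  | cons x t ih =>
    intro s r mx0 mn0 mx1 mn1
    rw [PySem.List.enumerate_cons]
    simp only [List.foldl_cons, List.map_cons, List.countP_cons]
    have key : pvStepB MAX MIN (r, mx0, mn0, mx1, mn1) (s, x)
        = (r + (if pvMatch (s, x) then 1 else 0),
           max mx0 (pvV0 MAX MIN (s, x)), min mn0 (pvV0 MAX MIN (s, x)),
           max mx1 (pvV1 MAX MIN (s, x)), min mn1 (pvV1 MAX MIN (s, x))) := by
      by_cases hm : pvMatch (s, x) = true <;>
        simp only [pvStepB, pvV0, pvV1, pvMatch, pvEdit] at * <;>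
        simp [hm, pvIfMax, pvIfMin] <;> (try (split <;> simp [pvIfMax, pvIfMin]))
    rw [key, ih]
    push_cast
    split <;> simp <;> ring

-- running max/min from a safe initial bound equals max?/min? of the list
theorem pvMaxGetD (l : List Int) (a : Int) (hne : l ≠ []) (hb : ∀ y ∈ l, a ≤ y) :
    (PySem.List.max? l (fun y => y)).getD 0 = l.foldl max a := by
  cases l with
  | nil => exact absurd rfl hne
  | cons y t =>
    rw [PySem.List.max?_id_cons]
    have : max a y = y := max_eq_right (hb y (by simp))
    simp [this]

theorem pvMinGetD (l : List Int) (a : Int) (hne : l ≠ []) (hb : ∀ y ∈ l, y ≤ a) :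
    (PySem.List.min? l (fun y => y)).getD 0 = l.foldl min a := by
  cases l with
  | nil => exact absurd rfl hne
  | cons y t =>
    rw [PySem.List.min?_id_cons]
    have : min a y = y := min_eq_right (hb y (by simp))
    simp [this]

-- ===== VERDICT (by name: the statement is the Claim_ definition above) =====
theorem makeParityAlternating_spec : Claim_equal_makeParityAlternating := by
  unfold Claim_equal_makeParityAlternating
  intro nums _
  unfold Spec_makeParityAlternating
  unfold makeParityAlternating makeParityAlternating_alt
  by_cases hn : nums.length < 2
  · simp [hn]
  · simp only [hn, if_false]
    have hne : nums ≠ [] := by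
      intro h; subst h; simp at hn
    set MAX := (PySem.List.max? nums (fun y => y)).getD 0 with hMAX
    set MIN := (PySem.List.min? nums (fun y => y)).getD 0 with hMIN
    -- bounds on the elements of nums
    have hmaxsome : ∃ m, PySem.List.max? nums (fun y => y) = some m := by
      cases h : PySem.List.max? nums (fun y => y) with
      | none => exact absurd ((PySem.List.max?_eq_none_iff nums (fun y => y)).mp h) hne
      | some m => exact ⟨m, rfl⟩
    have hminsome : ∃ m, PySem.List.min? nums (fun y => y) = some m := by
      cases h : PySem.List.min? nums (fun y => y) with
      | none => exact absurd ((PySem.List.min?_eq_none_iff nums (fun y => y)).mp h) hne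
      | some m => exact ⟨m, rfl⟩
    obtain ⟨mM, hmM⟩ := hmaxsome
    obtain ⟨mm, hmm⟩ := hminsome
    have hub : ∀ y ∈ nums, y ≤ MAX := by
      intro y hy
      have := PySem.List.max?_isMax hmM y hy
      simp [hMAX, hmM]; exact this
    have hlb : ∀ y ∈ nums, MIN ≤ y := by
      intro y hy
      have := PySem.List.min?_isMin hmm y hy
      simp [hMIN, hmm]; exact this
    -- bounds on edited values
    have hv : ∀ (v : (Int × Int) → Int), (v = pvV0 MAX MIN ∨ v = pvV1 MAX MIN) →
        ∀ q ∈ (PySem.List.enumerate nums 0).map v, MIN - 1 ≤ q ∧ q ≤ MAX := by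
      intro v hvv q hq
      rw [List.mem_map] at hq
      obtain ⟨p, hp, rfl⟩ := hq
      have hx : p.2 ∈ nums := by
        have := PySem.List.map_snd_enumerate nums (0 : Int)
        exact this ▸ List.mem_map_of_mem hp
      have h1 := hub p.2 hx
      have h2 := hlb p.2 hx
      have hedit : MIN - 1 ≤ pvEdit MAX MIN p ∧ pvEdit MAX MIN p ≤ MAX := by
        unfold pvEdit
        by_cases hA : (p.2 == MAX) = true
        · have := eq_of_beq hA; simp [hA]; omega
        · by_cases hB : (p.2 == MIN) = true
          · have hxm := eq_of_beq hB
            have hne2 : p.2 ≠ MAX := by intro h; exact hA (beq_iff_eq.mpr h)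
            simp [hA, hB]; omega
          · simp [hA, hB]; omega
      rcases hvv with rfl | rfl <;> simp only [pvV0, pvV1] <;> split <;>
        first | exact hedit | exact ⟨by omega, h1⟩
    -- nonemptiness of the mapped lists
    have hnee : ∀ (v : (Int × Int) → Int), (PySem.List.enumerate nums 0).map v ≠ [] := by
      intro v h
      have := congrArg List.length h
      simp [PySem.List.length_enumerate] at this
      exact hne this
    -- evaluate A's two func calls
    have hA0 := pvA_loop MAX MIN 0 (Or.inl rfl) nums [] 0
    have hA1 := pvA_loop MAX MIN 1 (Or.inr rfl) nums [] 0
    simp only [List.nil_append, List.length_nil, Nat.cast_zero] at hA0 hA1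
    simp only [show ((0:Int) = 0) = True from by simp, show ((1:Int) = 0) = False from by simp,
      if_true, if_false] at hA0 hA1
    -- evaluate B's fold
    have hB := pvB_loop MAX MIN nums 0 0 (MIN - 1) MAX (MIN - 1) MAX
    unfold pvFuncA
    rw [hA0, hA1, hB]
    simp only
    -- ranges agree
    have hmax0 := pvMaxGetD ((PySem.List.enumerate nums 0).map (pvV0 MAX MIN)) (MIN - 1)
      (hnee _) (fun y hy => (hv _ (Or.inl rfl) y hy).1)
    have hmin0 := pvMinGetD ((PySem.List.enumerate nums 0).map (pvV0 MAX MIN)) MAX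
      (hnee _) (fun y hy => (hv _ (Or.inl rfl) y hy).2)
    have hmax1 := pvMaxGetD ((PySem.List.enumerate nums 0).map (pvV1 MAX MIN)) (MIN - 1)
      (hnee _) (fun y hy => (hv _ (Or.inr rfl) y hy).1)
    have hmin1 := pvMinGetD ((PySem.List.enumerate nums 0).map (pvV1 MAX MIN)) MAX
      (hnee _) (fun y hy => (hv _ (Or.inr rfl) y hy).2)
    rw [hmax0, hmin0, hmax1, hmin1]
    -- counts agree: countP (!match) = n - countP match
    have hcount : ((PySem.List.enumerate nums 0).countP (fun p => !pvMatch p) : Int)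
        = (nums.length : Int) - ((PySem.List.enumerate nums 0).countP pvMatch : Int) := by
      have h1 : (PySem.List.enumerate nums 0).countP pvMatch
          + (PySem.List.enumerate nums 0).countP (fun p => !pvMatch p)
          = (PySem.List.enumerate nums 0).length := by
        simpa using (List.length_eq_countP_add_countP (p := pvMatch)
          (l := PySem.List.enumerate nums 0)).symm
      have h2 : (PySem.List.enumerate nums 0).length = nums.length :=
        PySem.List.length_enumerate nums 0
      omega
    rw [hcount]
    simp only [zero_add]
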